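-- pv_equiv track=rewrite | github.com/boarboar/MPU6050 | ESP8266/console/unitmap.py | getReSortedWalls
-- ===== SOURCE A (Python) =====
-- from operator import itemgetter
--
-- def getReSortedWalls(walls0, p, scan_max_dist):
--     wall_dist=[]
--     maxdist2=scan_max_dist*scan_max_dist
--     for walls in walls0 :
--         p0=walls[0]
--         p1=walls[1]
--         d0=(p0[0]-p[0])*(p0[0]-p[0])+(p0[1]-p[1])*(p0[1]-p[1])
--         d1=(p1[0]-p[0])*(p1[0]-p[0])+(p1[1]-p[1])*(p1[1]-p[1])
--         d=d0
--         if d1<d0 : d=d1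
--         if d<maxdist2 :
--             wall_dist.append((p0, p1, walls[2], walls[3], walls[4], d))
--
--     return sorted(wall_dist, key=itemgetter(5))
-- ===== SOURCE B (Python) =====
-- from operator import itemgetter
--
-- def getReSortedWalls(walls0, p, scan_max_dist):
--     maxdist2 = scan_max_dist * scan_max_dist
--     tagged = [(w[0], w[1], w[2], w[3], w[4],
--                min((w[0][0]-p[0])**2 + (w[0][1]-p[1])**2,
--                    (w[1][0]-p[0])**2 + (w[1][1]-p[1])**2))
--               for w in walls0]
--     tagged.sort(key=itemgetter(5))
--     out = []
--     for t in tagged: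
--         if t[5] >= maxdist2:
--             break
--         out.append(t)
--     return out
-- ===== Notes on version B (the rewrite author's own statement) =====
-- stated objective: alternative
-- what changed: A filters walls by distance and then sorts the survivors; B tags every wall with its distance, sorts the full list, and cuts the result off at the first wall at or beyond the threshold (sort-then-truncate instead of filter-then-sort), exploiting that the filter predicate is a strict bound on the sort key.
import Mathlib
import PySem

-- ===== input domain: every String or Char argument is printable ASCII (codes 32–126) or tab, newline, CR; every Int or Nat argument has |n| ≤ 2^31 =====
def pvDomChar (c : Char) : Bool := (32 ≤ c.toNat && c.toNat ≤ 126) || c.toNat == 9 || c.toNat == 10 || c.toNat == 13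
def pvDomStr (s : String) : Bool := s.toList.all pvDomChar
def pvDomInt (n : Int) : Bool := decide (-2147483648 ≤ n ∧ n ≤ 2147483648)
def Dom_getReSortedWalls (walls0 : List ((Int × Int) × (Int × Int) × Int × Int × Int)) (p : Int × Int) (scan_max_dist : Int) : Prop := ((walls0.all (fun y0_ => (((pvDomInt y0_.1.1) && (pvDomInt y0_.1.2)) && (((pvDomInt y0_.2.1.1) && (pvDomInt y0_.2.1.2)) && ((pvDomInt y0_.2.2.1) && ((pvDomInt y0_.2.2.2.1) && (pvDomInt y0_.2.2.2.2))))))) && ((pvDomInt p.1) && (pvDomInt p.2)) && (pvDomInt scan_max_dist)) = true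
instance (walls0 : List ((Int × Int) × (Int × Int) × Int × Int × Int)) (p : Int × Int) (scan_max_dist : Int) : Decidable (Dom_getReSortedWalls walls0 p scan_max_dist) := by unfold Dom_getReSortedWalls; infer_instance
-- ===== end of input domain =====

-- B replaces A's filter-then-sort by tag-all, sort-all, truncate-at-threshold (alternative decomposition, same output).

-- ===== PORT A =====
-- literal transliteration of A: append passing tuples in input order, then stable sort by the 6th field
def getReSortedWalls (walls0 : List ((Int × Int) × (Int × Int) × Int × Int × Int)) (p : Int × Int) (scan_max_dist : Int) : List ((Int × Int) × (Int × Int) × Int × Int × Int × Int) :=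
  let maxdist2 := scan_max_dist * scan_max_dist
  let wall_dist := walls0.foldl (fun acc walls =>
    let p0 := walls.1
    let p1 := walls.2.1
    let d0 := (p0.1 - p.1) * (p0.1 - p.1) + (p0.2 - p.2) * (p0.2 - p.2)
    let d1 := (p1.1 - p.1) * (p1.1 - p.1) + (p1.2 - p.2) * (p1.2 - p.2)
    let d := if d1 < d0 then d1 else d0
    if d < maxdist2 then acc ++ [(p0, p1, walls.2.2.1, walls.2.2.2.1, walls.2.2.2.2, d)] else acc) []
  PySem.List.sorted wall_dist (fun t => t.2.2.2.2.2) false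

-- ===== PORT B =====
-- B's final loop: collect the sorted prefix, stopping (break) at the first tuple whose distance reaches the bound
def pvTakeBelow (c : Int) : List ((Int × Int) × (Int × Int) × Int × Int × Int × Int) → List ((Int × Int) × (Int × Int) × Int × Int × Int × Int)
  | [] => []
  | t :: ts => if t.2.2.2.2.2 ≥ c then [] else t :: pvTakeBelow c ts

def getReSortedWalls_alt (walls0 : List ((Int × Int) × (Int × Int) × Int × Int × Int)) (p : Int × Int) (scan_max_dist : Int) : List ((Int × Int) × (Int × Int) × Int × Int × Int × Int) :=
  let maxdist2 := scan_max_dist * scan_max_dist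
  let tagged := walls0.map (fun w =>
    (w.1, w.2.1, w.2.2.1, w.2.2.2.1, w.2.2.2.2,
      min ((w.1.1 - p.1) ^ 2 + (w.1.2 - p.2) ^ 2) ((w.2.1.1 - p.1) ^ 2 + (w.2.1.2 - p.2) ^ 2)))
  pvTakeBelow maxdist2 (PySem.List.sorted tagged (fun t => t.2.2.2.2.2) false)

-- ===== PRECONDITION & SPEC =====
def Spec_getReSortedWalls (walls0 : List ((Int × Int) × (Int × Int) × Int × Int × Int)) (p : Int × Int) (scan_max_dist : Int) (out : List ((Int × Int) × (Int × Int) × Int × Int × Int × Int)) : Prop := out = getReSortedWalls_alt walls0 p scan_max_dist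
instance (walls0 : List ((Int × Int) × (Int × Int) × Int × Int × Int)) (p : Int × Int) (scan_max_dist : Int) (out : List ((Int × Int) × (Int × Int) × Int × Int × Int × Int)) : Decidable (Spec_getReSortedWalls walls0 p scan_max_dist out) := by unfold Spec_getReSortedWalls; infer_instance

-- ===== CLAIM (what is proved, stated in full; the proofs are below) =====
def Claim_equal_getReSortedWalls : Prop := ∀ (walls0 : List ((Int × Int) × (Int × Int) × Int × Int × Int)) (p : Int × Int) (scan_max_dist : Int), Dom_getReSortedWalls walls0 p scan_max_dist → Spec_getReSortedWalls walls0 p scan_max_dist (getReSortedWalls walls0 p scan_max_dist)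

-- ===== LEMMAS AND PROOFS =====

-- truncating after inserting one element: the inserted element either lands inside the kept prefix or past it
theorem pvTakeBelow_insertBy (c : Int) (x : (Int × Int) × (Int × Int) × Int × Int × Int × Int)
    (acc : List ((Int × Int) × (Int × Int) × Int × Int × Int × Int)) :
    pvTakeBelow c (PySem.List.insertBy (fun a b => decide (a.2.2.2.2.2 < b.2.2.2.2.2)) x acc)
      = if x.2.2.2.2.2 < c then
          PySem.List.insertBy (fun a b => decide (a.2.2.2.2.2 < b.2.2.2.2.2)) x (pvTakeBelow c acc)
        else pvTakeBelow c acc := by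
  induction acc with
  | nil =>
    by_cases hx : x.2.2.2.2.2 < c
    · rw [if_pos hx]; simp [PySem.List.insertBy, pvTakeBelow, show ¬ x.2.2.2.2.2 ≥ c by omega]
    · rw [if_neg hx]; simp [PySem.List.insertBy, pvTakeBelow, show x.2.2.2.2.2 ≥ c by omega]
  | cons y ys ih =>
    by_cases hxy : x.2.2.2.2.2 < y.2.2.2.2.2
    · have h1 : PySem.List.insertBy (fun a b => decide (a.2.2.2.2.2 < b.2.2.2.2.2)) x (y :: ys)
          = x :: y :: ys := by simp [PySem.List.insertBy, hxy]
      rw [h1]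
      by_cases hx : x.2.2.2.2.2 < c
      · rw [if_pos hx]
        by_cases hy : y.2.2.2.2.2 < c
        · simp [pvTakeBelow, PySem.List.insertBy, hxy, show ¬ x.2.2.2.2.2 ≥ c by omega,
                show ¬ y.2.2.2.2.2 ≥ c by omega]
        · simp [pvTakeBelow, PySem.List.insertBy, show ¬ x.2.2.2.2.2 ≥ c by omega,
                show y.2.2.2.2.2 ≥ c by omega]
      · rw [if_neg hx]
        simp [pvTakeBelow, show x.2.2.2.2.2 ≥ c by omega, show y.2.2.2.2.2 ≥ c by omega]
    · have h1 : PySem.List.insertBy (fun a b => decide (a.2.2.2.2.2 < b.2.2.2.2.2)) x (y :: ys)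
          = y :: PySem.List.insertBy (fun a b => decide (a.2.2.2.2.2 < b.2.2.2.2.2)) x ys := by
        simp [PySem.List.insertBy, hxy]
      rw [h1]
      by_cases hy : y.2.2.2.2.2 < c
      · have h2 : ∀ ts, pvTakeBelow c (y :: ts) = y :: pvTakeBelow c ts := by
          intro ts; simp [pvTakeBelow, show ¬ y.2.2.2.2.2 ≥ c by omega]
        rw [h2, ih]
        by_cases hx : x.2.2.2.2.2 < c
        · rw [if_pos hx, if_pos hx, h2]
          simp [PySem.List.insertBy, hxy]
        · rw [if_neg hx, if_neg hx, h2]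
      · have hx : ¬ x.2.2.2.2.2 < c := by omega
        rw [if_neg hx]
        simp [pvTakeBelow, show y.2.2.2.2.2 ≥ c by omega]

-- truncating the whole insertion-sort loop = running the loop on the filtered input
theorem pvTakeBelow_foldl (c : Int) (xs acc : List ((Int × Int) × (Int × Int) × Int × Int × Int × Int)) :
    pvTakeBelow c (xs.foldl (fun acc x => PySem.List.insertBy (fun a b => decide (a.2.2.2.2.2 < b.2.2.2.2.2)) x acc) acc)
      = (xs.filter (fun t => decide (t.2.2.2.2.2 < c))).foldl
          (fun acc x => PySem.List.insertBy (fun a b => decide (a.2.2.2.2.2 < b.2.2.2.2.2)) x acc) (pvTakeBelow c acc) := by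
  induction xs generalizing acc with
  | nil => rfl
  | cons x xs ih =>
    simp only [List.foldl_cons, List.filter_cons]
    rw [ih, pvTakeBelow_insertBy]
    by_cases h : x.2.2.2.2.2 < c <;> simp [h]

-- sort the filtered list = truncate the sorted full list (the filter predicate is a strict bound on the sort key)
theorem sorted_filter_eq_takeBelow (c : Int) (xs : List ((Int × Int) × (Int × Int) × Int × Int × Int × Int)) :
    PySem.List.sorted (xs.filter (fun t => decide (t.2.2.2.2.2 < c))) (fun t => t.2.2.2.2.2) false
      = pvTakeBelow c (PySem.List.sorted xs (fun t => t.2.2.2.2.2) false) := by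
  rw [PySem.List.sorted_eq_foldl_insertBy, PySem.List.sorted_eq_foldl_insertBy, pvTakeBelow_foldl]
  rfl

-- A's accumulation loop builds exactly B's tagged list restricted to the passing walls (program-specific)
theorem wallDist_eq (walls0 : List ((Int × Int) × (Int × Int) × Int × Int × Int)) (p : Int × Int)
    (c : Int) (acc : List ((Int × Int) × (Int × Int) × Int × Int × Int × Int)) :
    walls0.foldl (fun acc walls =>
        if (if (walls.2.1.1 - p.1) * (walls.2.1.1 - p.1) + (walls.2.1.2 - p.2) * (walls.2.1.2 - p.2)
              < (walls.1.1 - p.1) * (walls.1.1 - p.1) + (walls.1.2 - p.2) * (walls.1.2 - p.2)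
            then (walls.2.1.1 - p.1) * (walls.2.1.1 - p.1) + (walls.2.1.2 - p.2) * (walls.2.1.2 - p.2)
            else (walls.1.1 - p.1) * (walls.1.1 - p.1) + (walls.1.2 - p.2) * (walls.1.2 - p.2)) < c
        then acc ++ [(walls.1, walls.2.1, walls.2.2.1, walls.2.2.2.1, walls.2.2.2.2,
              if (walls.2.1.1 - p.1) * (walls.2.1.1 - p.1) + (walls.2.1.2 - p.2) * (walls.2.1.2 - p.2)
                < (walls.1.1 - p.1) * (walls.1.1 - p.1) + (walls.1.2 - p.2) * (walls.1.2 - p.2)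
              then (walls.2.1.1 - p.1) * (walls.2.1.1 - p.1) + (walls.2.1.2 - p.2) * (walls.2.1.2 - p.2)
              else (walls.1.1 - p.1) * (walls.1.1 - p.1) + (walls.1.2 - p.2) * (walls.1.2 - p.2))]
        else acc) acc
      = acc ++ (walls0.map (fun w =>
          (w.1, w.2.1, w.2.2.1, w.2.2.2.1, w.2.2.2.2,
            min ((w.1.1 - p.1) ^ 2 + (w.1.2 - p.2) ^ 2) ((w.2.1.1 - p.1) ^ 2 + (w.2.1.2 - p.2) ^ 2)))).filter
          (fun t => decide (t.2.2.2.2.2 < c)) := by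
  induction walls0 generalizing acc with
  | nil => simp
  | cons w ws ih =>
    have key : ∀ a b : Int, (if b < a then b else a) = min a b := by
      intro a b; rw [min_def]; split_ifs <;> omega
    simp only [List.foldl_cons, List.map_cons, List.filter_cons]
    rw [ih]
    simp only [pow_two, key]
    by_cases h : min ((w.1.1 - p.1) * (w.1.1 - p.1) + (w.1.2 - p.2) * (w.1.2 - p.2))
        ((w.2.1.1 - p.1) * (w.2.1.1 - p.1) + (w.2.1.2 - p.2) * (w.2.1.2 - p.2)) < c <;>
      simp [h]

-- ===== VERDICT (by name: the statement is the Claim_ definition above) =====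
theorem getReSortedWalls_spec : Claim_equal_getReSortedWalls := by
  intro walls0 p scan_max_dist _
  show getReSortedWalls walls0 p scan_max_dist = getReSortedWalls_alt walls0 p scan_max_dist
  unfold getReSortedWalls getReSortedWalls_alt
  simp only []
  rw [wallDist_eq, List.nil_append, sorted_filter_eq_takeBelow]
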